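-- pv_equiv track=rewrite | github.com/MinKyeom/KMK-DREAM | Programmers/lv3/산 모양 타일링.py | solution
-- ===== SOURCE A (Python) =====
-- def solution(n, tops):
--     reuslt = 0
--     dp = [0] * (n + 1)  # 0~n
--     dp[0] = 1
--     # 첫 항
--     if tops[0] == 1:
--         dp[1] = 4
--     else:
--         dp[1] = 3
--
--     if n >= 2:
--         if tops[1] == 1:
--             if tops[0] == 1:
--                 dp[2] = 15
--             else:
--                 dp[2] = 11
--         else:
--             if tops[0] == 1:
--                 dp[2] = 11
--             else:
--                 dp[2] = 8
--
--     for i in range(2, n):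
--         if tops[i] == 1:
--             dp[i + 1] = dp[i] * 3
--             count = 1
--             for j in range(i):
--                 count *= (tops[j] + 2)
--             count += dp[i - 2]
--             dp[i + 1] += count
--         else:
--             dp[i + 1] = dp[i] * 2
--             count = 1
--             for j in range(i):
--                 count *= (tops[j] + 2)
--             count += dp[i - 2]
--             dp[i + 1] += count
--     return dp[-1] % 10007
-- ===== SOURCE B (Python) =====
-- def solution(n, tops):
--     M = 10007
--     if n == 1:
--         return (4 if tops[0] == 1 else 3) % M
--     d1 = 4 if tops[0] == 1 else 3
--     if tops[1] == 1:
--         d2 = 15 if tops[0] == 1 else 11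
--     else:
--         d2 = 11 if tops[0] == 1 else 8
--     prod = ((tops[0] + 2) * (tops[1] + 2)) % M
--     prev2, prev1, cur = 1, d1, d2
--     for i in range(2, n):
--         m = 3 if tops[i] == 1 else 2
--         nxt = (cur * m + prod + prev2) % M
--         prod = (prod * (tops[i] + 2)) % M
--         prev2, prev1, cur = prev1, cur, nxt
--     return cur % M
-- ===== Notes on version B (the rewrite author's own statement) =====
-- stated objective: faster
-- what changed: Replaced the O(n^2) recomputation of the prefix product inside the loop (and the full dp array) by a single pass maintaining a running prefix product and a rolling window of the last three dp values, with all arithmetic reduced mod 10007.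
import Mathlib
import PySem

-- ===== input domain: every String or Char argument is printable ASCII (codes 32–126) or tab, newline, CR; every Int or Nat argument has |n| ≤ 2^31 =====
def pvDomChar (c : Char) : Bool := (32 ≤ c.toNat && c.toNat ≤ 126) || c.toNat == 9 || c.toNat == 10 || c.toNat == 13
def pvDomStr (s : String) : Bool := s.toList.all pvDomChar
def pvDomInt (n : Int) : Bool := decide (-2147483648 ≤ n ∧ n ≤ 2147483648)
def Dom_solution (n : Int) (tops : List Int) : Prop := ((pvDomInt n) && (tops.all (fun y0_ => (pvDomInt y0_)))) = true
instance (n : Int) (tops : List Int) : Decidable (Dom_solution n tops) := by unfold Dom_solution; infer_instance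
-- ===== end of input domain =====

-- B replaces A's quadratic inner prefix-product recomputation and full dp array by one
-- pass with a running prefix product and a rolling window of three dp values, mod 10007.

-- ===== PORT A =====
-- dp[i] = v : exact for in-range i (Python raises IndexError out of range; excluded by Pre_)
def pvSetA (dp : List Int) (i : Int) (v : Int) : List Int :=
  if 0 ≤ i ∧ i < (dp.length : Int) then dp.set i.toNat v else dp

-- inner loop: count = 1; for j in range(i): count *= tops[j] + 2
def pvCountA (tops : List Int) (i : Int) : Int :=
  (PySem.List.pyRange 0 i).foldl (fun c j => c * (PySem.List.pyGetD tops j 0 + 2)) 1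

def pvStepA (tops : List Int) (dp : List Int) (i : Int) : List Int :=
  if PySem.List.pyGetD tops i 0 == 1 then
    let v := PySem.List.pyGetD dp i 0 * 3
    let count := pvCountA tops i + PySem.List.pyGetD dp (i - 2) 0
    pvSetA dp (i + 1) (v + count)
  else
    let v := PySem.List.pyGetD dp i 0 * 2
    let count := pvCountA tops i + PySem.List.pyGetD dp (i - 2) 0
    pvSetA dp (i + 1) (v + count)

def solution (n : Int) (tops : List Int) : Int :=
  let dp := List.replicate (n + 1).toNat (0 : Int)
  let dp := pvSetA dp 0 1
  let dp := pvSetA dp 1 (if PySem.List.pyGetD tops 0 0 == 1 then 4 else 3)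
  let dp :=
    if n ≥ 2 then
      pvSetA dp 2
        (if PySem.List.pyGetD tops 1 0 == 1 then
          (if PySem.List.pyGetD tops 0 0 == 1 then 15 else 11)
        else
          (if PySem.List.pyGetD tops 0 0 == 1 then 11 else 8))
    else dp
  let dp := (PySem.List.pyRange 2 n).foldl (pvStepA tops) dp
  PySem.Int.mod (PySem.List.pyGetD dp (-1) 0) 10007

-- ===== PORT B =====
-- rolling state (prev2, prev1, cur, prod)
def pvStepB (tops : List Int) (s : Int × Int × Int × Int) (i : Int) : Int × Int × Int × Int :=
  let m : Int := if PySem.List.pyGetD tops i 0 == 1 then 3 else 2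
  let nxt := PySem.Int.mod (s.2.2.1 * m + s.2.2.2 + s.1) 10007
  let prod' := PySem.Int.mod (s.2.2.2 * (PySem.List.pyGetD tops i 0 + 2)) 10007
  (s.2.1, s.2.2.1, nxt, prod')

def solution_alt (n : Int) (tops : List Int) : Int :=
  if n == 1 then
    PySem.Int.mod (if PySem.List.pyGetD tops 0 0 == 1 then 4 else 3) 10007
  else
    let d1 : Int := if PySem.List.pyGetD tops 0 0 == 1 then 4 else 3
    let d2 : Int :=
      if PySem.List.pyGetD tops 1 0 == 1 then
        (if PySem.List.pyGetD tops 0 0 == 1 then 15 else 11)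
      else
        (if PySem.List.pyGetD tops 0 0 == 1 then 11 else 8)
    let prod := PySem.Int.mod ((PySem.List.pyGetD tops 0 0 + 2) * (PySem.List.pyGetD tops 1 0 + 2)) 10007
    let s := (PySem.List.pyRange 2 n).foldl (pvStepB tops) (1, d1, d2, prod)
    PySem.Int.mod s.2.2.1 10007

-- ===== PRECONDITION & SPEC =====
-- Python A raises IndexError when n < 1 (dp[0]/dp[1] out of range) or when tops is shorter
-- than the n indices it reads; Pre_ admits exactly the inputs on which A returns.
def Pre_solution (n : Int) (tops : List Int) : Prop := 1 ≤ n ∧ n ≤ (tops.length : Int)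
instance (n : Int) (tops : List Int) : Decidable (Pre_solution n tops) := by
  unfold Pre_solution; infer_instance

def pvWitness_solution : Int × List Int := (3, [1, 0, 1])

def Spec_solution (n : Int) (tops : List Int) (out : Int) : Prop := out = solution_alt n tops
instance (n : Int) (tops : List Int) (out : Int) : Decidable (Spec_solution n tops out) := by
  unfold Spec_solution; infer_instance

-- ===== CLAIM (what is proved, stated in full; the proofs are below) =====
def Claim_equal_solution : Prop := ∀ (n : Int) (tops : List Int), Dom_solution n tops → Pre_solution n tops → Spec_solution n tops (solution n tops)


-- ===== LEMMAS AND PROOFS =====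

-- the exact recurrence computed by A's dp array
def pvF (tops : List Int) : Nat → Int
  | 0 => 1
  | 1 => if PySem.List.pyGetD tops 0 0 == 1 then 4 else 3
  | 2 =>
      if PySem.List.pyGetD tops 1 0 == 1 then
        (if PySem.List.pyGetD tops 0 0 == 1 then 15 else 11)
      else
        (if PySem.List.pyGetD tops 0 0 == 1 then 11 else 8)
  | (k + 3) =>
      pvF tops (k + 2) * (if PySem.List.pyGetD tops ((k : Int) + 2) 0 == 1 then 3 else 2)
        + (pvCountA tops ((k : Int) + 2) + pvF tops k)

-- A's dp list after the loop has reached counter i (entries > i still 0)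
def pvDpOf (tops : List Int) (L i : Nat) : List Int :=
  (List.range L).map (fun k => if k ≤ i then pvF tops k else 0)

lemma pvDpOf_length (tops : List Int) (L i : Nat) : (pvDpOf tops L i).length = L := by
  simp [pvDpOf]

lemma pvDpOf_getD (tops : List Int) (L i k : Nat) (hk : k < L) :
    PySem.List.pyGetD (pvDpOf tops L i) (k : Int) 0 = if k ≤ i then pvF tops k else 0 := by
  rw [PySem.List.pyGetD_natCast, pvDpOf, PySem.List.getD_map_range _ _ _ _ hk]

lemma pvF_succ (tops : List Int) (i : Nat) (h2 : 2 ≤ i) :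
    pvF tops (i + 1) =
      pvF tops i * (if PySem.List.pyGetD tops (i : Int) 0 == 1 then 3 else 2)
        + (pvCountA tops (i : Int) + pvF tops (i - 2)) := by
  obtain ⟨k, rfl⟩ : ∃ k, i = k + 2 := ⟨i - 2, by omega⟩
  have hc : ((k : Int) + 2) = ((k + 2 : Nat) : Int) := by push_cast; ring
  show pvF tops (k + 3) = _
  rw [pvF, hc]
  simp

lemma pvStepA_dpOf (tops : List Int) (N i : Nat) (h2 : 2 ≤ i) (hi : i < N) :
    pvStepA tops (pvDpOf tops (N + 1) i) (i : Int) = pvDpOf tops (N + 1) (i + 1) := by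
  have hgi : PySem.List.pyGetD (pvDpOf tops (N + 1) i) (i : Int) 0 = pvF tops i := by
    rw [pvDpOf_getD tops (N + 1) i i (by omega)]; simp
  have hcast : (i : Int) - 2 = ((i - 2 : Nat) : Int) := by omega
  have hgi2 : PySem.List.pyGetD (pvDpOf tops (N + 1) i) ((i : Int) - 2) 0 = pvF tops (i - 2) := by
    rw [hcast, pvDpOf_getD tops (N + 1) i (i - 2) (by omega)]
    simp
  have hset : ∀ v : Int, pvSetA (pvDpOf tops (N + 1) i) ((i : Int) + 1) v =
      (pvDpOf tops (N + 1) i).set (i + 1) v := by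
    intro v
    rw [pvSetA]
    rw [if_pos (by constructor <;> [omega; (rw [pvDpOf_length]; omega)])]
    have he : ((i : Int) + 1).toNat = i + 1 := by omega
    rw [he]
  have hsetdp : (pvDpOf tops (N + 1) i).set (i + 1) (pvF tops (i + 1)) = pvDpOf tops (N + 1) (i + 1) := by
    apply List.ext_getElem (by simp [pvDpOf])
    intro k hk1 hk2
    simp only [pvDpOf, List.getElem_set, List.getElem_map, List.getElem_range]
    have hk : k < N + 1 := by simpa [pvDpOf] using hk2
    by_cases h : i + 1 = k
    · subst h; simp
    · rw [if_neg h]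
      by_cases hki : k ≤ i
      · rw [if_pos hki, if_pos (by omega)]
      · rw [if_neg hki, if_neg (by omega)]
  rw [pvStepA]
  by_cases ht : PySem.List.pyGetD tops (i : Int) 0 == 1
  · rw [if_pos ht]
    simp only [hgi, hgi2]
    rw [hset, ← hsetdp]
    congr 1
    rw [pvF_succ tops i h2, if_pos ht]
  · rw [if_neg ht]
    simp only [hgi, hgi2]
    rw [hset, ← hsetdp]
    congr 1
    rw [pvF_succ tops i h2, if_neg ht]

lemma pvLoopA (tops : List Int) (N : Nat) (c : Nat) (i : Nat) (h2 : 2 ≤ i) (hc : i + c = N) :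
    (PySem.List.pyRange (i : Int) (N : Int)).foldl (pvStepA tops) (pvDpOf tops (N + 1) i)
      = pvDpOf tops (N + 1) N := by
  induction c generalizing i with
  | zero =>
      have : i = N := by omega
      subst this
      rw [show PySem.List.pyRange (i : Int) (i : Int) = [] from by
        simp [PySem.List.pyRange]]
      rfl
  | succ c ih =>
      have hlt : (i : Int) < (N : Int) := by exact_mod_cast by omega
      rw [PySem.List.pyRange_one_cons hlt]
      simp only [List.foldl_cons]
      rw [pvStepA_dpOf tops N i h2 (by omega)]
      have : ((i : Int) + 1) = ((i + 1 : Nat) : Int) := by push_cast; ring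
      rw [this, ih (i + 1) (by omega) (by omega)]

lemma pvMod_modEq (x : Int) : PySem.Int.mod x 10007 ≡ x [ZMOD 10007] := by
  rw [PySem.Int.mod_eq_emod_of_pos (by norm_num)]
  exact Int.emod_emod_of_dvd x dvd_rfl

lemma pvCountA_succ (tops : List Int) (i : Int) (h : 0 ≤ i) :
    pvCountA tops (i + 1) = pvCountA tops i * (PySem.List.pyGetD tops i 0 + 2) := by
  unfold pvCountA
  rw [PySem.List.pyRange_one_succ_right h]
  simp

-- B-side: congruence invariant for the rolling state
lemma pvLoopB (tops : List Int) (N : Nat) (c : Nat) (i : Nat) (h2 : 2 ≤ i) (hc : i + c = N)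
    (p2 p1 cur pr : Int)
    (hp2 : p2 ≡ pvF tops (i - 2) [ZMOD 10007])
    (hp1 : p1 ≡ pvF tops (i - 1) [ZMOD 10007])
    (hcur : cur ≡ pvF tops i [ZMOD 10007])
    (hpr : pr ≡ pvCountA tops (i : Int) [ZMOD 10007]) :
    ((PySem.List.pyRange (i : Int) (N : Int)).foldl (pvStepB tops) (p2, p1, cur, pr)).2.2.1
      ≡ pvF tops N [ZMOD 10007] := by
  induction c generalizing i p2 p1 cur pr with
  | zero =>
      have : i = N := by omega
      subst this
      rw [show PySem.List.pyRange (i : Int) (i : Int) = [] from by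
        simp [PySem.List.pyRange]]
      exact hcur
  | succ c ih =>
      have hlt : (i : Int) < (N : Int) := by exact_mod_cast by omega
      rw [PySem.List.pyRange_one_cons hlt]
      simp only [List.foldl_cons]
      rw [pvStepB]
      have hnxt : PySem.Int.mod (cur * (if PySem.List.pyGetD tops (i : Int) 0 == 1 then 3 else 2) + pr + p2) 10007
          ≡ pvF tops (i + 1) [ZMOD 10007] := by
        refine (pvMod_modEq _).trans ?_
        rw [pvF_succ tops i h2]
        have h3 : cur * (if PySem.List.pyGetD tops (i : Int) 0 == 1 then (3:Int) else 2) + pr + p2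
            ≡ pvF tops i * (if PySem.List.pyGetD tops (i : Int) 0 == 1 then (3:Int) else 2)
              + pvCountA tops (i : Int) + pvF tops (i - 2) [ZMOD 10007] :=
          ((hcur.mul_right _).add hpr).add hp2
        have h4 : pvF tops i * (if PySem.List.pyGetD tops (i : Int) 0 == 1 then (3:Int) else 2)
              + pvCountA tops (i : Int) + pvF tops (i - 2)
            = pvF tops i * (if PySem.List.pyGetD tops (i : Int) 0 == 1 then (3:Int) else 2)
              + (pvCountA tops (i : Int) + pvF tops (i - 2)) := by ring
        rw [← h4]
        exact h3
      have hprod : PySem.Int.mod (pr * (PySem.List.pyGetD tops (i : Int) 0 + 2)) 10007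
          ≡ pvCountA tops ((i : Int) + 1) [ZMOD 10007] := by
        refine (pvMod_modEq _).trans ?_
        rw [pvCountA_succ tops (i : Int) (by omega)]
        exact hpr.mul_right _
      have hcast : ((i : Int) + 1) = ((i + 1 : Nat) : Int) := by push_cast; ring
      rw [hcast] at hprod ⊢
      refine ih (i + 1) (by omega) (by omega) _ _ _ _ ?_ ?_ ?_ hprod
      · simpa [show i + 1 - 2 = i - 1 from by omega] using hp1
      · simpa using hcur
      · simpa using hnxt

lemma pvSetA_length (dp : List Int) (i v : Int) : (pvSetA dp i v).length = dp.length := by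
  unfold pvSetA; split <;> simp

lemma pvSetA_in (dp : List Int) (i v : Int) (h : 0 ≤ i ∧ i < (dp.length : Int)) :
    pvSetA dp i v = dp.set i.toNat v := if_pos h

lemma pvInit (tops : List Int) (N : Nat) (h : 2 ≤ N) :
    pvSetA (pvSetA (pvSetA (List.replicate (N + 1) (0 : Int)) 0 1) 1
        (if PySem.List.pyGetD tops 0 0 == 1 then 4 else 3)) 2
        (if PySem.List.pyGetD tops 1 0 == 1 then
          (if PySem.List.pyGetD tops 0 0 == 1 then 15 else 11)
        else
          (if PySem.List.pyGetD tops 0 0 == 1 then 11 else 8))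
      = pvDpOf tops (N + 1) 2 := by
  rw [pvSetA_in _ _ _ ⟨by norm_num, by simp [pvSetA_length]; omega⟩]
  rw [pvSetA_in _ _ _ ⟨by norm_num, by simp [pvSetA_length]; omega⟩]
  rw [pvSetA_in _ _ _ ⟨by norm_num, by simp⟩]
  rw [show ((0 : Int).toNat = 0) from rfl, show ((1 : Int).toNat = 1) from rfl,
      show ((2 : Int).toNat = 2) from rfl]
  apply List.ext_getElem (by simp [pvDpOf])
  intro k hk1 hk2
  have hk : k < N + 1 := by simp [pvDpOf] at hk2; omega
  rcases (by omega : k = 0 ∨ k = 1 ∨ k = 2 ∨ 3 ≤ k) with rfl | rfl | rfl | h3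
  · simp [pvDpOf, pvF]
  · have h1 : 1 < N + 1 := by omega
    simp [pvDpOf, pvF]
  · have h1 : 2 < N + 1 := by omega
    simp [pvDpOf, pvF]
  · simp only [pvDpOf, List.getElem_map, List.getElem_range, List.getElem_set,
      List.getElem_replicate]
    rw [if_neg (by omega : ¬(2 = k)), if_neg (by omega : ¬(1 = k)),
        if_neg (by omega : ¬(0 = k)), if_neg (by omega : ¬(k ≤ 2))]

lemma pvDpOf_neg_one (tops : List Int) (N : Nat) :
    PySem.List.pyGetD (pvDpOf tops (N + 1) N) (-1) 0 = pvF tops N := by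
  have h1 : PySem.List.pyIdx? (pvDpOf tops (N + 1) N).length (-1) = some N := by
    rw [pvDpOf_length]
    simp [PySem.List.pyIdx?]
  simp only [PySem.List.pyGetD, PySem.List.pyGet?, h1, Option.bind_some]
  simp [pvDpOf]

theorem solution_eq (n : Int) (tops : List Int) (hpre : Pre_solution n tops) :
    solution n tops = solution_alt n tops := by
  obtain ⟨h1, _⟩ := hpre
  by_cases hn1 : n = 1
  · subst hn1
    by_cases ht : PySem.List.pyGetD tops 0 0 == 1 <;>
      simp [solution, solution_alt, pvSetA, ht] <;> decide
  · -- n ≥ 2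
    have h2 : 2 ≤ n := by omega
    obtain ⟨N, rfl⟩ : ∃ N : Nat, n = (N : Int) := ⟨n.toNat, by omega⟩
    have hN : 2 ≤ N := by exact_mod_cast h2
    have hLen : ((N : Int) + 1).toNat = N + 1 := by omega
    -- A side
    have hA : solution (N : Int) tops = PySem.Int.mod (pvF tops N) 10007 := by
      rw [solution]
      simp only [hLen, if_pos h2]
      rw [pvInit tops N hN]
      rw [show ((2 : Int) = ((2 : Nat) : Int)) from rfl]
      rw [pvLoopA tops N (N - 2) 2 (by omega) (by omega)]
      rw [pvDpOf_neg_one]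
    -- B side
    have hB : ∃ cur : Int, solution_alt (N : Int) tops = PySem.Int.mod cur 10007
        ∧ cur ≡ pvF tops N [ZMOD 10007] := by
      rw [solution_alt]
      rw [if_neg (by simp; omega)]
      refine ⟨_, rfl, ?_⟩
      rw [show ((2 : Int) = ((2 : Nat) : Int)) from rfl]
      refine pvLoopB tops N (N - 2) 2 (by omega) (by omega) _ _ _ _ ?_ ?_ ?_ ?_
      · exact Int.ModEq.refl _
      · exact Int.ModEq.refl _
      · exact Int.ModEq.refl _
      · refine (pvMod_modEq _).trans ?_
        have : pvCountA tops ((2 : Nat) : Int) =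
            1 * (PySem.List.pyGetD tops 0 0 + 2) * (PySem.List.pyGetD tops 1 0 + 2) := by
          rw [show (((2 : Nat) : Int)) = (2 : Int) from rfl]
          rw [pvCountA]
          rw [show PySem.List.pyRange (0 : Int) 2 = [0, 1] from by decide]
          simp
        rw [this]
        ring_nf
        exact Int.ModEq.refl _
    obtain ⟨cur, hBe, hBc⟩ := hB
    rw [hA, hBe]
    rw [PySem.Int.mod_eq_emod_of_pos (by norm_num), PySem.Int.mod_eq_emod_of_pos (by norm_num)]
    exact hBc.symm

-- ===== VERDICT (by name: the statement is the Claim_ definition above) =====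
theorem solution_spec : Claim_equal_solution := by
  intro n tops _ hpre
  exact solution_eq n tops hpre
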